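-- pv_equiv track=rewrite | github.com/Erlonealpha/Kemono-Manager | kemonobakend/utils/run_code.py | strip_indent
-- ===== SOURCE A (Python) =====
-- def strip_indent(line:str, space):
--     '''去除缩进'''
--     index = 0
--     if space == 0: return line
--     while space > 0:
--         c = line[0]
--         if c == ' ': space -= 1; index += 1
--         elif c == '\t': space -= 4; index += 1
--         else: break
--     return line[index:]
-- ===== SOURCE B (Python) =====
-- def strip_indent(line: str, space):
--     '''去除缩进'''
--     if space <= 0:
--         return line
--     c = line[0]
--     if c == ' ':
--         index = space
--     elif c == '\t':
--         index = -(-space // 4)  # integer ceiling of space/4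
--     else:
--         index = 0
--     return line[index:]
-- ===== Notes on version B (the rewrite author's own statement) =====
-- stated objective: simpler
-- what changed: A repeatedly inspects line[0] in a loop that decrements space by 1 (space) or 4 (tab) per step; B reads the first character once and computes the slice index in closed form (space, ceil(space/4), or 0), with no loop.
import Mathlib
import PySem

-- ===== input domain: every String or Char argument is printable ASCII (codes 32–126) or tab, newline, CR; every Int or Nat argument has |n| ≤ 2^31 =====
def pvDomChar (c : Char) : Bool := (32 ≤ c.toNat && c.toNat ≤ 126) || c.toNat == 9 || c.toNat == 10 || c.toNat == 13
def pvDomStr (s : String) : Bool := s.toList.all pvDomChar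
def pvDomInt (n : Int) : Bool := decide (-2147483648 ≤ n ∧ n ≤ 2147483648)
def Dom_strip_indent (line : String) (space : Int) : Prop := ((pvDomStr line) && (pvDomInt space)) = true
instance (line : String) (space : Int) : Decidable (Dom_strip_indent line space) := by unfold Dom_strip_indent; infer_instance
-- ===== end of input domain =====

-- B replaces A's per-unit decrement loop by a single closed-form slice-index computation (simpler).

-- ===== PORT A =====
-- the while loop: state (space, index); line[0] on the empty string raises IndexError
-- (that input is excluded by Pre_strip_indent, the none branch is unreachable there)
def stripLoopA (cs : List Char) (space : Int) (index : Nat) : Nat :=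
  if 0 < space then
    match cs.head? with
    | none => index            -- Python raises IndexError here; outside Pre_
    | some c =>
      if c = ' ' then stripLoopA cs (space - 1) (index + 1)
      else if c = '\t' then stripLoopA cs (space - 4) (index + 1)
      else index
  else index
termination_by space.toNat
decreasing_by all_goals omega

def strip_indent (line : String) (space : Int) : String :=
  if space = 0 then line
  else String.ofList (PySem.List.slice line.toList (some ((stripLoopA line.toList space 0 : Nat) : Int)) none)

-- ===== PORT B =====
def strip_indent_alt (line : String) (space : Int) : String :=
  if space ≤ 0 then line
  else
    match line.toList.head? with
    | none => line             -- Python raises IndexError here; outside Pre_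
    | some c =>
      let index : Int :=
        if c = ' ' then space
        else if c = '\t' then -(PySem.Int.floordiv (-space) 4)
        else 0
      String.ofList (PySem.List.slice line.toList (some index) none)

-- ===== PRECONDITION & SPEC =====
-- Pre_ excludes exactly the inputs where Python A raises IndexError (line[0] on the empty string).
def Pre_strip_indent (line : String) (space : Int) : Prop := 0 < space → line ≠ ""
instance (line : String) (space : Int) : Decidable (Pre_strip_indent line space) := by unfold Pre_strip_indent; infer_instance
def pvWitness_strip_indent : String × Int := ("  hi", 2)

def Spec_strip_indent (line : String) (space : Int) (out : String) : Prop := out = strip_indent_alt line space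
instance (line : String) (space : Int) (out : String) : Decidable (Spec_strip_indent line space out) := by unfold Spec_strip_indent; infer_instance

-- ===== CLAIM (what is proved, stated in full; the proofs are below) =====
def Claim_equal_strip_indent : Prop := ∀ (line : String) (space : Int), Dom_strip_indent line space → Pre_strip_indent line space → Spec_strip_indent line space (strip_indent line space)

-- ===== LEMMAS AND PROOFS =====

-- space case: the loop steps exactly `space` times
theorem stripLoopA_space (rest : List Char) : ∀ (n index : Nat),
    stripLoopA (' ' :: rest) ((n : Int) + 1) index = index + (n + 1) := by
  intro n
  induction n with
  | zero =>
    intro index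
    rw [stripLoopA]; simp
    rw [stripLoopA]; simp
  | succ m ih =>
    intro index
    rw [stripLoopA]
    have h1 : (0 : Int) < (↑(m + 1) : Int) + 1 := by positivity
    have h2 : ((↑(m + 1) : Int) + 1) - 1 = (↑m : Int) + 1 := by push_cast; ring
    simp only [if_pos h1, List.head?_cons, reduceIte, h2, ih]
    omega

-- tab case: the loop steps ceil(space/4) times, i.e. n/4 + 1 for space = n+1
theorem stripLoopA_tab (rest : List Char) : ∀ (n index : Nat),
    stripLoopA ('\t' :: rest) ((n : Int) + 1) index = index + (n / 4 + 1) := by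
  intro n
  induction n using Nat.strong_induction_on with
  | _ n ih =>
    intro index
    rw [stripLoopA]
    have h1 : (0 : Int) < (↑n : Int) + 1 := by positivity
    have hne : ¬ ('\t' : Char) = ' ' := by decide
    simp only [if_pos h1, List.head?_cons, if_neg hne, ite_true]
    by_cases h4 : 4 ≤ n
    · have h2 : ((↑n : Int) + 1) - 4 = (↑(n - 4) : Int) + 1 := by
        push_cast [h4]; ring_nf
      rw [h2, ih (n - 4) (by omega)]
      omega
    · have h2 : ¬ (0 : Int) < ((↑n : Int) + 1) - 4 := by omega
      rw [stripLoopA, if_neg h2]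
      omega

-- other first character: the loop exits immediately
theorem stripLoopA_other (rest : List Char) (c : Char) (hc1 : c ≠ ' ') (hc2 : c ≠ '\t')
    (space : Int) (index : Nat) : stripLoopA (c :: rest) space index = index := by
  rw [stripLoopA]
  split_ifs with h
  · simp [List.head?_cons, hc1, hc2]
  · rfl

theorem stripLoopA_neg (cs : List Char) (space : Int) (h : ¬ 0 < space) (index : Nat) :
    stripLoopA cs space index = index := by
  rw [stripLoopA, if_neg h]

-- ===== VERDICT (by name: the statement is the Claim_ definition above) =====
theorem strip_indent_spec : Claim_equal_strip_indent := by
  intro line space _ hpre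
  unfold Spec_strip_indent strip_indent strip_indent_alt
  by_cases h0 : space = 0
  · simp [h0]
  · rw [if_neg h0]
    by_cases hle : space ≤ 0
    · rw [if_pos hle]
      rw [stripLoopA_neg _ _ (by omega)]
      rw [show ((0 : Nat) : Int) = (0 : Int) from rfl]
      simp [PySem.List.slice_zero_start, PySem.List.slice_none_none]
    · rw [if_neg hle]
      have hpos : 0 < space := by omega
      have hne : line ≠ "" := hpre hpos
      obtain ⟨c, rest, hcs⟩ : ∃ c rest, line.toList = c :: rest := by
        cases hcl : line.toList with
        | nil => exact absurd (by ext1; simp [hcl]) hne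
        | cons c rest => exact ⟨c, rest, rfl⟩
      rw [hcs]
      simp only [List.head?_cons]
      obtain ⟨n, hn⟩ : ∃ n : Nat, space = (n : Int) + 1 := ⟨(space - 1).toNat, by omega⟩
      by_cases hsp : c = ' '
      · subst hsp
        rw [hn, stripLoopA_space rest n 0]
        simp
      · by_cases htab : c = '\t'
        · subst htab
          rw [hn, stripLoopA_tab rest n 0]
          have hfd : PySem.Int.floordiv (-((n : Int) + 1)) 4 = (-((n : Int) + 1)) / 4 :=
            PySem.Int.floordiv_eq_ediv_of_pos (by omega)
          have : -(PySem.Int.floordiv (-((n : Int) + 1)) 4) = ((n / 4 + 1 : Nat) : Int) := by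
            rw [hfd]; omega
          simp only [if_neg (show ¬ ('\t' : Char) = ' ' by decide), ite_true, this]
          try simp
        · rw [stripLoopA_other rest c hsp htab]
          simp only [if_neg hsp, if_neg htab]
          norm_num
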